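-- pv_equiv track=rewrite | github.com/saleor/saleor | vendored/pyxb/pyxb/utils/utility.py | IteratedCompareMixed
-- ===== SOURCE A (Python) =====
-- def IteratedCompareMixed (lhs, rhs):
--     """Tuple comparison that permits C{None} as lower than any value,
--     and defines other cross-type comparison.
--
--     @return: -1 if lhs < rhs, 0 if lhs == rhs, 1 if lhs > rhs."""
--     li = iter(lhs)
--     ri = iter(rhs)
--     while True:
--         try:
--             (lv, rv) = (next(li), next(ri))
--             if lv is None:
--                 if rv is None:
--                     continue
--                 return -1
--             if rv is None:
--                 return 1
--             if lv == rv: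
--                 continue
--             if lv < rv:
--                 return -1
--             return 1
--         except StopIteration:
--             nl = len(lhs)
--             nr = len(rhs)
--             if nl < nr:
--                 return -1
--             if nl == nr:
--                 return 0
--             return 1
-- ===== SOURCE B (Python) =====
-- def IteratedCompareMixed(lhs, rhs):
--     kl = [(0,) if v is None else (1, v) for v in lhs]
--     kr = [(0,) if v is None else (1, v) for v in rhs]
--     if kl < kr:
--         return -1
--     if kl == kr:
--         return 0
--     return 1
-- ===== Notes on version B (the rewrite author's own statement) =====
-- stated objective: idiomatic
-- what changed: Replaces the explicit iterator loop with StopIteration handling and manual length comparison by mapping each element to a normalized sort key ((0,) for None, (1, v) otherwise) and letting Python's native lexicographic list comparison decide the result.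
import Mathlib
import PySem

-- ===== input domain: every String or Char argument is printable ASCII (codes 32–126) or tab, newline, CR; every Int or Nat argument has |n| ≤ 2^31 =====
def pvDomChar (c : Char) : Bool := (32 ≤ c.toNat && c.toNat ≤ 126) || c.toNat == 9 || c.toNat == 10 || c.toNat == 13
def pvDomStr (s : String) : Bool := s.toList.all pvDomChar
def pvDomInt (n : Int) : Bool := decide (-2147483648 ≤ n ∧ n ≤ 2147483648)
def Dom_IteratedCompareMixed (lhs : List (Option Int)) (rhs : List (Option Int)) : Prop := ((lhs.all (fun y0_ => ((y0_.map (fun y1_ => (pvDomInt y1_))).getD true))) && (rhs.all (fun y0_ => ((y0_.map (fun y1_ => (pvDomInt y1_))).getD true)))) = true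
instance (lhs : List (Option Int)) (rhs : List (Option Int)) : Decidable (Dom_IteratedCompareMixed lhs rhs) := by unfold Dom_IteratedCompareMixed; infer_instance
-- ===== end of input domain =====

-- B replaces A's explicit iterator loop (with StopIteration length fallback) by mapping each
-- element to a normalized sort key and using native lexicographic list comparison (idiomatic).

-- ===== PORT A =====
-- the while/try loop: walk both iterators; on StopIteration compare the ORIGINAL lengths
def pvAloop (lhs rhs : List (Option Int)) : List (Option Int) → List (Option Int) → Int
  | a :: l, b :: r =>
    match a, b with
    | none, none => pvAloop lhs rhs l r
    | none, some _ => -1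
    | some _, none => 1
    | some x, some y =>
      if x = y then pvAloop lhs rhs l r
      else if x < y then -1 else 1
  | _, _ =>
    if lhs.length < rhs.length then -1
    else if lhs.length = rhs.length then 0 else 1

def IteratedCompareMixed (lhs : List (Option Int)) (rhs : List (Option Int)) : Int :=
  pvAloop lhs rhs lhs rhs

-- ===== PORT B =====
-- normalized key: (0,) for None, (1, v) for a value (padded to a pair; first component decides)
def pvKey : Option Int → Int × Int
  | none => (0, 0)
  | some v => (1, v)

-- Python's '<' on pairs
def pvPairLt (p q : Int × Int) : Bool := p.1 < q.1 || (p.1 = q.1 && p.2 < q.2)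

-- Python's native lexicographic comparison of the two key lists, as a three-way result
def pvLexCmp : List (Int × Int) → List (Int × Int) → Int
  | [], [] => 0
  | [], _ :: _ => -1
  | _ :: _, [] => 1
  | p :: l, q :: r => if p = q then pvLexCmp l r else if pvPairLt p q then -1 else 1

def IteratedCompareMixed_alt (lhs : List (Option Int)) (rhs : List (Option Int)) : Int :=
  pvLexCmp (lhs.map pvKey) (rhs.map pvKey)

-- ===== PRECONDITION & SPEC =====
def Spec_IteratedCompareMixed (lhs : List (Option Int)) (rhs : List (Option Int)) (out : Int) : Prop := out = IteratedCompareMixed_alt lhs rhs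
instance (lhs : List (Option Int)) (rhs : List (Option Int)) (out : Int) : Decidable (Spec_IteratedCompareMixed lhs rhs out) := by unfold Spec_IteratedCompareMixed; infer_instance

-- ===== CLAIM (what is proved, stated in full; the proofs are below) =====
def Claim_equal_IteratedCompareMixed : Prop := ∀ (lhs : List (Option Int)) (rhs : List (Option Int)), Dom_IteratedCompareMixed lhs rhs → Spec_IteratedCompareMixed lhs rhs (IteratedCompareMixed lhs rhs)

-- ===== LEMMAS AND PROOFS =====
-- Loop invariant: as long as the two suffixes were consumed in lockstep (equal drop counts,
-- expressed as the cross-sum length equation), A's loop equals B's lex comparison of the suffixes.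
theorem pvAloop_eq_lexCmp (lhs rhs : List (Option Int)) :
    ∀ (l r : List (Option Int)),
      lhs.length + r.length = rhs.length + l.length →
      pvAloop lhs rhs l r = pvLexCmp (l.map pvKey) (r.map pvKey) := by
  intro l
  induction l with
  | nil =>
    intro r h
    cases r with
    | nil =>
      simp at h
      simp [pvAloop, pvLexCmp, h]
    | cons b r =>
      have : lhs.length < rhs.length := by simp at h; omega
      simp [pvAloop, pvLexCmp, this]
  | cons a l ih =>
    intro r h
    cases r with
    | nil =>
      have h1 : ¬ lhs.length < rhs.length := by simp at h; omega
      have h2 : ¬ lhs.length = rhs.length := by simp at h; omega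
      simp [pvAloop, pvLexCmp, h1, h2]
    | cons b r =>
      have h' : lhs.length + r.length = rhs.length + l.length := by simp at h ⊢; omega
      cases a with
      | none =>
        cases b with
        | none => simpa [pvAloop, pvLexCmp, pvKey] using ih r h'
        | some y => simp [pvAloop, pvLexCmp, pvKey, pvPairLt]
      | some x =>
        cases b with
        | none =>
          have hnl : pvPairLt (1, x) (0, 0) = false := by simp [pvPairLt]
          simp [pvAloop, pvLexCmp, pvKey, hnl]
        | some y =>
          by_cases hxy : x = y
          · subst hxy
            simpa [pvAloop, pvLexCmp, pvKey] using ih r h'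
          · by_cases hlt : x < y
            · simp [pvAloop, pvLexCmp, pvKey, pvPairLt, hxy, hlt]
            · simp [pvAloop, pvLexCmp, pvKey, pvPairLt, hxy, hlt]

-- ===== VERDICT (by name: the statement is the Claim_ definition above) =====
theorem IteratedCompareMixed_spec : Claim_equal_IteratedCompareMixed := by
  intro lhs rhs _
  show IteratedCompareMixed lhs rhs = IteratedCompareMixed_alt lhs rhs
  unfold IteratedCompareMixed IteratedCompareMixed_alt
  exact pvAloop_eq_lexCmp lhs rhs lhs rhs (by omega)
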